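-- pv_equiv track=rewrite | github.com/AI-Planning/pddl-generators | spider/generate.py | split_pile_in_movable_parts
-- ===== SOURCE A (Python) =====
-- def is_compatible(card1, card2):
--     _, suit1, value1 = card1
--     _, suit2, value2 = card2
--     return suit1 == suit2 and value1 == value2 + 1
--
-- def split_pile_in_movable_parts(pile):
--     parts = []
--     current_part = []
--     for card in pile:
--         if current_part and not is_compatible(current_part[-1], card):
--             parts.append(current_part)
--             current_part = []
--         current_part.append(card)
--     parts.append(current_part)
--     return parts
-- ===== SOURCE B (Python) =====
-- def is_compatible(card1, card2):
--     _, suit1, value1 = card1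
--     _, suit2, value2 = card2
--     return suit1 == suit2 and value1 == value2 + 1
--
-- def split_pile_in_movable_parts(pile):
--     # two-phase: compute break positions, then slice between consecutive boundaries
--     breaks = [0] + [i for i, (a, b) in enumerate(zip(pile, pile[1:]), 1)
--                     if not is_compatible(a, b)] + [len(pile)]
--     return [pile[a:b] for a, b in zip(breaks, breaks[1:])]
-- ===== Notes on version B (the rewrite author's own statement) =====
-- stated objective: alternative
-- what changed: Replaces the running-accumulator single pass (append to current part, flush on incompatibility) by a two-phase boundaries-then-partition computation: first collect the break indices from adjacent pairs, then slice the pile between consecutive boundaries.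
import Mathlib
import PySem

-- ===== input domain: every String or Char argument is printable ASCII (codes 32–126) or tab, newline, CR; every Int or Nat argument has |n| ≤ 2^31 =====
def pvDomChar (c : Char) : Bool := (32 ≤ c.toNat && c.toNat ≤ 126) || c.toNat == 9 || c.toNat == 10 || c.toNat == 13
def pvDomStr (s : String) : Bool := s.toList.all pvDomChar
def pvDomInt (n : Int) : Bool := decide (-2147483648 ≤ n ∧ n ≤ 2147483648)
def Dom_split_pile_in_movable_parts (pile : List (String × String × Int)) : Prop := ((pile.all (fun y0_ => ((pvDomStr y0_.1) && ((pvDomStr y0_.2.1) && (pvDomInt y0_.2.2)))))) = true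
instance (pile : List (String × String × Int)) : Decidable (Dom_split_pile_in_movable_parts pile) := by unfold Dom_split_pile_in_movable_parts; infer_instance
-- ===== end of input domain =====

-- B replaces A's running-accumulator pass by a boundaries-then-partition two-phase computation (alternative decomposition, same cost).

-- shared module helper is_compatible
def pvIsCompatible (c1 c2 : String × String × Int) : Bool :=
  c1.2.1 == c2.2.1 && c1.2.2 == c2.2.2 + 1

-- ===== PORT A =====
def split_pile_in_movable_parts (pile : List (String × String × Int)) : List (List (String × String × Int)) :=
  let st := pile.foldl
    (fun (s : List (List (String × String × Int)) × List (String × String × Int)) card =>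
      if !s.2.isEmpty && !pvIsCompatible s.2.getLast! card
      then (s.1 ++ [s.2], [card])
      else (s.1, s.2 ++ [card]))
    ([], [])
  st.1 ++ [st.2]

-- ===== PORT B =====
-- break positions: [i for i, (a, b) in enumerate(zip(pile, pile[1:]), 1) if not is_compatible(a, b)]
def pvInner (pile : List (String × String × Int)) : List Int :=
  ((PySem.List.enumerate (pile.zip (PySem.List.slice pile (some 1) none)) 1).filter
      (fun ia => !(pvIsCompatible ia.2.1 ia.2.2))).map (fun ia => ia.1)

-- [pile[a:b] for a, b in zip(breaks, breaks[1:])]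
def pvParts (xs : List (String × String × Int)) (bs : List Int) : List (List (String × String × Int)) :=
  (bs.zip bs.tail).map (fun ab => PySem.List.slice xs (some ab.1) (some ab.2))

def split_pile_in_movable_parts_alt (pile : List (String × String × Int)) : List (List (String × String × Int)) :=
  let breaks : List Int := [0] ++ pvInner pile ++ [(pile.length : Int)]
  pvParts pile breaks

-- ===== PRECONDITION & SPEC =====
def Spec_split_pile_in_movable_parts (pile : List (String × String × Int)) (out : List (List (String × String × Int))) : Prop := out = split_pile_in_movable_parts_alt pile
instance (pile : List (String × String × Int)) (out : List (List (String × String × Int))) : Decidable (Spec_split_pile_in_movable_parts pile out) := by unfold Spec_split_pile_in_movable_parts; infer_instance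

-- ===== CLAIM (what is proved, stated in full; the proofs are below) =====
def Claim_equal_split_pile_in_movable_parts : Prop := ∀ (pile : List (String × String × Int)), Dom_split_pile_in_movable_parts pile → Spec_split_pile_in_movable_parts pile (split_pile_in_movable_parts pile)

-- ===== LEMMAS AND PROOFS =====

-- common reference function: the grouping both programs compute
def pvG : List (String × String × Int) → List (List (String × String × Int))
  | [] => [[]]
  | [x] => [[x]]
  | x :: y :: t =>
      if pvIsCompatible x y
      then match pvG (y :: t) with
           | p :: ps => (x :: p) :: ps
           | [] => [[x]]
      else [x] :: pvG (y :: t)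

theorem pvG_ne_nil (l : List (String × String × Int)) : pvG l ≠ [] := by
  match l with
  | [] => simp [pvG]
  | [x] => simp [pvG]
  | x :: y :: t =>
      simp only [pvG]
      split
      · cases h : pvG (y :: t) <;> simp
      · simp

-- ===== A-side: the fold equals pvG =====

def pvStep (s : List (List (String × String × Int)) × List (String × String × Int))
    (card : String × String × Int) :
    List (List (String × String × Int)) × List (String × String × Int) :=
  if !s.2.isEmpty && !pvIsCompatible s.2.getLast! card
  then (s.1 ++ [s.2], [card])
  else (s.1, s.2 ++ [card])

-- what the tail of the fold contributes given the pending current part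
def pvGlue (cur : List (String × String × Int)) (l : List (String × String × Int)) :
    List (List (String × String × Int)) :=
  match l with
  | [] => [cur]
  | x :: _ =>
      if !cur.isEmpty && !pvIsCompatible cur.getLast! x
      then cur :: pvG l
      else match pvG l with
           | p :: ps => (cur ++ p) :: ps
           | [] => [cur]

theorem pvG_cons_eq_glue (x : String × String × Int) (xs : List (String × String × Int)) :
    pvG (x :: xs) = pvGlue [x] xs := by
  match xs with
  | [] => rfl
  | y :: t =>
      have hl : ([x] : List (String × String × Int)).getLast! = x := by
        simp [List.getLast!_eq_getLast?_getD]
      simp only [pvGlue, pvG, hl, List.isEmpty_cons, Bool.not_false, Bool.true_and,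
        List.singleton_append]
      by_cases h : pvIsCompatible x y = true
      · rw [if_pos h, if_neg (by simp [h])]
      · have h' : pvIsCompatible x y = false := Bool.of_not_eq_true h
        rw [if_neg h, if_pos (by simp [h'])]

theorem pvGlue_push (cur : List (String × String × Int)) (x : String × String × Int)
    (xs : List (String × String × Int))
    (h : ¬(!cur.isEmpty && !pvIsCompatible cur.getLast! x) = true) :
    pvGlue cur (x :: xs) = pvGlue (cur ++ [x]) xs := by
  match xs with
  | [] =>
      show pvGlue cur [x] = pvGlue (cur ++ [x]) []
      simp only [pvGlue, pvG]
      rw [if_neg h]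
  | y :: t =>
      have hne : (cur ++ [x]).isEmpty = false := by simp
      by_cases hc : pvIsCompatible x y = true
      · cases hg : pvG (y :: t) with
        | nil => exact absurd hg (pvG_ne_nil _)
        | cons p ps =>
            have hG : pvG (x :: y :: t) = (x :: p) :: ps := by
              simp only [pvG, hg]
              rw [if_pos hc]
            simp only [pvGlue]
            rw [if_neg h, if_neg (by simp [hne, hc]), hG, hg]
            simp
      · have hc' : pvIsCompatible x y = false := Bool.of_not_eq_true hc
        have hG : pvG (x :: y :: t) = [x] :: pvG (y :: t) := by
          simp only [pvG]
          rw [if_neg hc]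
        simp only [pvGlue]
        rw [if_neg h, if_pos (by simp [hne, hc']), hG]

theorem pvFold_eq_glue (l : List (String × String × Int)) :
    ∀ (parts : List (List (String × String × Int))) (cur : List (String × String × Int)),
    (let st := l.foldl pvStep (parts, cur); st.1 ++ [st.2]) = parts ++ pvGlue cur l := by
  induction l with
  | nil => intro parts cur; simp [pvGlue]
  | cons x xs ih =>
      intro parts cur
      simp only [List.foldl_cons]
      by_cases h : (!cur.isEmpty && !pvIsCompatible cur.getLast! x) = true
      · have hstep : pvStep (parts, cur) x = (parts ++ [cur], [x]) := by
          simp only [pvStep]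
          rw [if_pos h]
        rw [hstep, ih]
        have hglue : pvGlue cur (x :: xs) = cur :: pvG (x :: xs) := by
          simp only [pvGlue]
          rw [if_pos h]
        rw [hglue, pvG_cons_eq_glue]
        simp
      · have hstep : pvStep (parts, cur) x = (parts, cur ++ [x]) := by
          simp only [pvStep]
          rw [if_neg h]
        rw [hstep, ih, pvGlue_push cur x xs h]

theorem portA_eq_pvG (pile : List (String × String × Int)) :
    split_pile_in_movable_parts pile = pvG pile := by
  have h := pvFold_eq_glue pile [] []
  simp only at h
  have hA : split_pile_in_movable_parts pile =
      (pile.foldl pvStep ([], [])).1 ++ [(pile.foldl pvStep ([], [])).2] := rfl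
  rw [hA, h]
  match pile with
  | [] => simp [pvGlue, pvG]
  | x :: xs =>
      simp only [pvGlue, List.nil_append]
      rw [if_neg (by simp)]
      cases hg : pvG (x :: xs) with
      | nil => exact absurd hg (pvG_ne_nil _)
      | cons p ps => simp

-- ===== B-side: boundaries-then-slices equals pvG =====

theorem pvEnumerate_shift {α : Type} (xs : List α) (s : Int) :
    PySem.List.enumerate xs (s + 1) = (PySem.List.enumerate xs s).map (fun p => (p.1 + 1, p.2)) := by
  induction xs generalizing s with
  | nil => simp [PySem.List.enumerate_nil]
  | cons x t ih => simp [PySem.List.enumerate_cons, ih]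

theorem pvInner_cons (x y : String × String × Int) (t : List (String × String × Int)) :
    pvInner (x :: y :: t) =
      (if pvIsCompatible x y then [] else [1]) ++ (pvInner (y :: t)).map (fun b => b + 1) := by
  simp only [pvInner, PySem.List.slice_from_one, List.tail_cons, List.zip_cons_cons,
    PySem.List.enumerate_cons]
  rw [show (1 : Int) + 1 = 1 + 1 from rfl, pvEnumerate_shift]
  rw [List.filter_cons, List.filter_map, List.map_map]
  by_cases h : pvIsCompatible x y = true
  · simp [h, Function.comp_def]
  · simp [Bool.of_not_eq_true h, Function.comp_def]

theorem pvInner_pos (l : List (String × String × Int)) : ∀ b ∈ pvInner l, 1 ≤ b := by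
  match l with
  | [] => simp [pvInner]
  | [x] => simp [pvInner, PySem.List.slice_from_one]
  | x :: y :: t =>
      intro b hb
      rw [pvInner_cons] at hb
      rcases List.mem_append.1 hb with h | h
      · split at h <;> simp_all
      · obtain ⟨c, hc, rfl⟩ := List.mem_map.1 h
        have := pvInner_pos (y :: t) c hc
        omega

theorem pvSlice_cons_succ (x : String × String × Int) (xs : List (String × String × Int))
    (a b : Int) (ha : 0 ≤ a) (hb : 0 ≤ b) :
    PySem.List.slice (x :: xs) (some (a + 1)) (some (b + 1)) =
      PySem.List.slice xs (some a) (some b) := by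
  rw [PySem.List.slice_toNat _ (by omega) (by omega),
      PySem.List.slice_toNat _ ha hb]
  have h1 : (a + 1).toNat = a.toNat + 1 := by omega
  have h2 : (b + 1).toNat = b.toNat + 1 := by omega
  rw [h1, h2, List.drop_succ_cons]
  congr 1
  omega

theorem pvSlice_cons_zero (x : String × String × Int) (xs : List (String × String × Int))
    (b : Int) (hb : 0 ≤ b) :
    PySem.List.slice (x :: xs) (some 0) (some (b + 1)) =
      x :: PySem.List.slice xs (some 0) (some b) := by
  rw [PySem.List.slice_toNat _ (by omega) (by omega),
      PySem.List.slice_toNat _ le_rfl hb]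
  have h2 : (b + 1).toNat = b.toNat + 1 := by omega
  simp [h2]

theorem pvParts_shift (x : String × String × Int) (xs : List (String × String × Int))
    (bs : List Int) (h : ∀ b ∈ bs, 0 ≤ b) :
    pvParts (x :: xs) (bs.map (fun b => b + 1)) = pvParts xs bs := by
  match bs with
  | [] => rfl
  | [b] => rfl
  | b1 :: b2 :: t =>
      simp only [pvParts, List.map_cons, List.tail_cons, List.zip_cons_cons]
      rw [pvSlice_cons_succ x xs b1 b2 (h b1 (by simp)) (h b2 (by simp))]
      congr 1
      have := pvParts_shift x xs (b2 :: t) (fun b hb => h b (by simp_all))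
      simpa [pvParts] using this

theorem portB_eq_pvG (pile : List (String × String × Int)) :
    split_pile_in_movable_parts_alt pile = pvG pile := by
  match pile with
  | [] => rfl
  | [x] => rfl
  | x :: y :: t =>
      have ih := portB_eq_pvG (y :: t)
      have hpos : ∀ b ∈ pvInner (y :: t) ++ [((y :: t).length : Int)], 0 ≤ b := by
        intro b hb
        rcases List.mem_append.1 hb with h | h
        · have := pvInner_pos _ b h; omega
        · simp at h; omega
      obtain ⟨c, cs, hM⟩ : ∃ c cs, pvInner (y :: t) ++ [((y :: t).length : Int)] = c :: cs := by
        cases h : pvInner (y :: t) ++ [((y :: t).length : Int)] with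
        | nil => simp at h
        | cons c cs => exact ⟨c, cs, rfl⟩
      have hc0 : 0 ≤ c := hpos c (by rw [hM]; simp)
      by_cases hcomp : pvIsCompatible x y = true
      · -- breaks = 0 :: (inner' ++ [n']).map (+1)
        have hbr : ([0] ++ pvInner (x :: y :: t) ++ [((x :: y :: t).length : Int)])
            = 0 :: ((pvInner (y :: t) ++ [((y :: t).length : Int)]).map (fun b => b + 1)) := by
          rw [pvInner_cons, if_pos hcomp]
          simp
        show pvParts (x :: y :: t) _ = _
        rw [hbr, hM, List.map_cons]
        have hz : pvParts (x :: y :: t) (0 :: (c + 1) :: cs.map (fun b => b + 1))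
            = PySem.List.slice (x :: y :: t) (some 0) (some (c + 1))
              :: pvParts (x :: y :: t) ((c + 1) :: cs.map (fun b => b + 1)) := by
          simp [pvParts]
        rw [hz]
        have hs : pvParts (x :: y :: t) ((c + 1) :: cs.map (fun b => b + 1))
            = pvParts (y :: t) (c :: cs) := by
          have := pvParts_shift x (y :: t) (c :: cs) (fun b hb => hpos b (by rw [hM]; exact hb))
          simpa using this
        rw [hs]
        have hBtail : split_pile_in_movable_parts_alt (y :: t)
            = PySem.List.slice (y :: t) (some 0) (some c) :: pvParts (y :: t) (c :: cs) := by
          show pvParts (y :: t) _ = _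
          rw [show ([0] ++ pvInner (y :: t) ++ [((y :: t).length : Int)]) = 0 :: c :: cs by
            simpa using hM]
          simp [pvParts]
        rw [pvSlice_cons_zero x (y :: t) c hc0]
        have hGt : pvG (y :: t) = PySem.List.slice (y :: t) (some 0) (some c) :: pvParts (y :: t) (c :: cs) := by
          rw [← ih, hBtail]
        simp only [pvG, hcomp, if_true, hGt]
      · have hbr : ([0] ++ pvInner (x :: y :: t) ++ [((x :: y :: t).length : Int)])
            = 0 :: 1 :: ((pvInner (y :: t) ++ [((y :: t).length : Int)]).map (fun b => b + 1)) := by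
          rw [pvInner_cons, if_neg hcomp]
          simp
        show pvParts (x :: y :: t) _ = _
        rw [hbr, hM, List.map_cons]
        have hz : pvParts (x :: y :: t) (0 :: 1 :: (c + 1) :: cs.map (fun b => b + 1))
            = PySem.List.slice (x :: y :: t) (some 0) (some 1)
              :: pvParts (x :: y :: t) (1 :: (c + 1) :: cs.map (fun b => b + 1)) := by
          simp [pvParts]
        rw [hz]
        have h1 : PySem.List.slice (x :: y :: t) (some 0) (some 1) = [x] := by
          rw [show (1 : Int) = 0 + 1 from rfl, pvSlice_cons_zero x (y :: t) 0 le_rfl]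
          rw [PySem.List.slice_toNat _ le_rfl le_rfl]
          simp
        have hs : pvParts (x :: y :: t) (1 :: (c + 1) :: cs.map (fun b => b + 1))
            = pvParts (y :: t) (0 :: c :: cs) := by
          have := pvParts_shift x (y :: t) (0 :: c :: cs)
            (fun b hb => by
              rcases List.mem_cons.mp hb with rfl | hb'
              · omega
              · exact hpos b (by rw [hM]; exact hb'))
          simpa using this
        rw [h1, hs]
        have hBtail : split_pile_in_movable_parts_alt (y :: t) = pvParts (y :: t) (0 :: c :: cs) := by
          show pvParts (y :: t) _ = _
          rw [show ([0] ++ pvInner (y :: t) ++ [((y :: t).length : Int)]) = 0 :: c :: cs by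
            simpa using hM]
        rw [← hBtail, ih]
        have hcomp' : pvIsCompatible x y = false := Bool.of_not_eq_true hcomp
        simp [pvG, hcomp']

-- ===== VERDICT (by name: the statement is the Claim_ definition above) =====
theorem split_pile_in_movable_parts_spec : Claim_equal_split_pile_in_movable_parts := by
  intro pile _
  show split_pile_in_movable_parts pile = split_pile_in_movable_parts_alt pile
  rw [portA_eq_pvG, portB_eq_pvG]
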